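-- pv_equiv track=rewrite | github.com/uchenna-j-edeh/dailly_problems | after_twittr/split_arr_condition.py | helper
-- ===== SOURCE A (Python) =====
-- def helper(arr, n, start, lsum, rsum):
--     if start == n: # 0 == 3|false.
--         return lsum == rsum
--
--     if arr[start] % 5 == 0: # 1 % 5 == 0| False
--         rsum += arr[start]
--
--     elif arr[start] % 3 == 0: # 1 % 3 == 0| false
--         lsum += arr[start]
--
--     else: # (arr, 3, 1, 0+1, 0  ) or (arr, 3, 1, 0, 0+1)
--         return helper(arr, n, start+1, lsum + arr[start], rsum) or helper(arr, n, start+1, lsum, rsum + arr[start])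
--
--     return helper(arr, n, start + 1, lsum, rsum)
-- ===== SOURCE B (Python) =====
-- def helper(arr, n, start, lsum, rsum):
--     # One linear pass: forced items (multiples of 5 -> right, other multiples of 3 -> left)
--     # fold into a running difference; free items are collected.  Then a set DP over
--     # reachable differences replaces the exponential branching recursion.
--     diff = lsum - rsum
--     free = []
--     i = start
--     while i != n:
--         x = arr[i]
--         if x % 5 == 0:
--             diff -= x
--         elif x % 3 == 0:
--             diff += x
--         else:
--             free.append(x)
--         i += 1
--     reach = {diff}
--     for x in free:
--         new = set()
--         for d in reach:
--             new.add(d + x)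
--             new.add(d - x)
--         reach = new
--     return 0 in reach
-- ===== Notes on version B (the rewrite author's own statement) =====
-- stated objective: alternative
-- what changed: Replaced A's exponential two-way branching recursion by a single pass that folds forced items (multiples of 5 to the right sum, other multiples of 3 to the left sum) into a running difference and collects the free items, then a set DP over reachable differences, answering whether 0 is reachable.
import Mathlib
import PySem

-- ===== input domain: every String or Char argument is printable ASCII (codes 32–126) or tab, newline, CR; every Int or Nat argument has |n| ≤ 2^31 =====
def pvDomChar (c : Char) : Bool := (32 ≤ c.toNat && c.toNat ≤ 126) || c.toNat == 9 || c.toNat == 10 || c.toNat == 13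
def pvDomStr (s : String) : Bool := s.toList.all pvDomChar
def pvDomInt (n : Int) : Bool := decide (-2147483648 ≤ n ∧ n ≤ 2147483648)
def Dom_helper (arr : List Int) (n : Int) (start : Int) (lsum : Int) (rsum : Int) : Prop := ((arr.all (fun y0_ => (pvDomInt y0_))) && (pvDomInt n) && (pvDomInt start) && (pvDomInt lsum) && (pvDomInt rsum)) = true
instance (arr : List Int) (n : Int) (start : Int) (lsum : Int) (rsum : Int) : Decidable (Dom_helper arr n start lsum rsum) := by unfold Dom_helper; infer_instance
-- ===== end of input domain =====

-- B replaces A's exponential branching recursion by one pass that separates forced items from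
-- free ones plus a reachable-difference set DP over the free items (objective: alternative;
-- the DP deduplicates equal differences instead of branching over all sign choices).

-- ===== PORT A =====
-- Transliteration of A: the recursion on start; arr[start] is pyGetD (in range under Pre_);
-- the 'else false' arm is only the totality guard for start > n, where the Python recursion never
-- reaches its base case (it ends in IndexError or RecursionError)
-- (excluded by Pre_helper).
def helper (arr : List Int) (n : Int) (start : Int) (lsum : Int) (rsum : Int) : Bool :=
  if start = n then lsum == rsum
  else if _h : start < n then
    let x := PySem.List.pyGetD arr start 0
    if PySem.Int.mod x 5 == 0 then
      helper arr n (start + 1) lsum (rsum + x)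
    else if PySem.Int.mod x 3 == 0 then
      helper arr n (start + 1) (lsum + x) rsum
    else
      helper arr n (start + 1) (lsum + x) rsum || helper arr n (start + 1) lsum (rsum + x)
  else false
termination_by (n - start).toNat
decreasing_by all_goals omega

-- ===== PORT B =====
-- Transliteration of Source B: the while-loop collecting (diff, free) -- recursion on i with the
-- same totality guard for i > n (Python raises/loops there; outside Pre_) -- then the set DP
-- and '0 in reach'.
-- while i != n, with fuel (n - start).toNat: the fuel-0 arm is only the totality guard for
-- start > n, where the Python loops/raises (outside Pre_).
def altCollect (arr : List Int) (n : Int) : Nat → Int → Int → List Int → Int × List Int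
  | 0, _, diff, free => (diff, free)
  | fuel + 1, i, diff, free =>
    if i = n then (diff, free)
    else
      let x := PySem.List.pyGetD arr i 0
      if PySem.Int.mod x 5 == 0 then altCollect arr n fuel (i + 1) (diff - x) free
      else if PySem.Int.mod x 3 == 0 then altCollect arr n fuel (i + 1) (diff + x) free
      else altCollect arr n fuel (i + 1) diff (free ++ [x])

def helper_alt (arr : List Int) (n : Int) (start : Int) (lsum : Int) (rsum : Int) : Bool :=
  let p := altCollect arr n (n - start).toNat start (lsum - rsum) []
  let reach := p.2.foldl
    (fun (reach : PySem.Set Int) x =>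
      reach.foldl
        (fun (new : PySem.Set Int) d => PySem.Set.add (PySem.Set.add new (d + x)) (d - x))
        PySem.Set.empty)
    (PySem.Set.ofList [p.1])
  PySem.Set.contains reach 0

-- ===== PRECONDITION & SPEC =====
-- Pre_ excludes exactly the inputs where the Python A raises: start > n (unbounded recursion,
-- RecursionError) and accessed indices outside Python's (negative-wrapping) range (IndexError).
def Pre_helper (arr : List Int) (n : Int) (start : Int) (lsum : Int) (rsum : Int) : Prop :=
  start ≤ n ∧ (start < n → -(arr.length : Int) ≤ start ∧ n ≤ (arr.length : Int))
instance (arr : List Int) (n : Int) (start : Int) (lsum : Int) (rsum : Int) : Decidable (Pre_helper arr n start lsum rsum) := by unfold Pre_helper; infer_instance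

def pvWitness_helper : List Int × Int × Int × Int × Int := ([3, 5, 7, 2], 4, 0, 0, 0)

def Spec_helper (arr : List Int) (n : Int) (start : Int) (lsum : Int) (rsum : Int) (out : Bool) : Prop := out = helper_alt arr n start lsum rsum
instance (arr : List Int) (n : Int) (start : Int) (lsum : Int) (rsum : Int) (out : Bool) : Decidable (Spec_helper arr n start lsum rsum out) := by unfold Spec_helper; infer_instance

-- ===== CLAIM (what is proved, stated in full; the proofs are below) =====
def Claim_equal_helper : Prop := ∀ (arr : List Int) (n : Int) (start : Int) (lsum : Int) (rsum : Int), Dom_helper arr n start lsum rsum → Pre_helper arr n start lsum rsum → Spec_helper arr n start lsum rsum (helper arr n start lsum rsum)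

-- ===== LEMMAS AND PROOFS =====

-- A's recursion, abstracted to the list of fetched elements.
def goA : List Int → Int → Int → Bool
  | [], l, s => l == s
  | x :: r, l, s =>
    if PySem.Int.mod x 5 == 0 then goA r l (s + x)
    else if PySem.Int.mod x 3 == 0 then goA r (l + x) s
    else goA r (l + x) s || goA r l (s + x)

-- Same, tracking only the difference lsum - rsum.
def goFD : List Int → Int → Bool
  | [], d => d == 0
  | x :: r, d =>
    if PySem.Int.mod x 5 == 0 then goFD r (d - x)
    else if PySem.Int.mod x 3 == 0 then goFD r (d + x)
    else goFD r (d + x) || goFD r (d - x)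

-- ± branching over the free elements only.
def go : List Int → Int → Bool
  | [], d => d == 0
  | x :: r, d => go r (d + x) || go r (d - x)

-- Net forced contribution and the list of free elements.
def deltaF : List Int → Int
  | [] => 0
  | x :: r =>
    if PySem.Int.mod x 5 == 0 then deltaF r - x
    else if PySem.Int.mod x 3 == 0 then deltaF r + x
    else deltaF r

def freeL : List Int → List Int
  | [] => []
  | x :: r =>
    if PySem.Int.mod x 5 == 0 then freeL r
    else if PySem.Int.mod x 3 == 0 then freeL r
    else x :: freeL r

lemma helper_eq_goA (arr : List Int) (n : Int) : ∀ (k : Nat) (start l s : Int),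
    (n - start).toNat = k → start ≤ n →
    helper arr n start l s
      = goA ((PySem.List.pyRange start n 1).map (fun i => PySem.List.pyGetD arr i 0)) l s := by
  intro k
  induction k with
  | zero =>
    intro start l s hk hle
    have h : start = n := by omega
    subst h
    rw [helper, PySem.List.pyRange_one_eq_nil le_rfl]
    simp [goA]
  | succ k ih =>
    intro start l s hk hle
    have hlt : start < n := by omega
    have hne : ¬ start = n := by omega
    rw [helper, PySem.List.pyRange_one_cons hlt]
    simp only [List.map_cons, goA, if_neg hne, dif_pos hlt]
    have ih' := fun l s => ih (start + 1) l s (by omega) (by omega)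
    split_ifs <;> simp_all

lemma goA_eq_goFD : ∀ (e : List Int) (l s : Int), goA e l s = goFD e (l - s) := by
  intro e
  induction e with
  | nil =>
    intro l s
    simp only [goA, goFD]
    rw [Bool.eq_iff_iff]
    simp [Int.sub_eq_zero]
  | cons x r ih =>
    intro l s
    simp only [goA, goFD]
    split_ifs with h1 h2
    · rw [ih, show l - (s + x) = l - s - x from by ring]
    · rw [ih, show l + x - s = l - s + x from by ring]
    · rw [ih, ih, show l + x - s = l - s + x from by ring,
        show l - (s + x) = l - s - x from by ring]

lemma goFD_eq_go : ∀ (e : List Int) (d : Int), goFD e d = go (freeL e) (d + deltaF e) := by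
  intro e
  induction e with
  | nil => intro d; simp [goFD, freeL, deltaF, go]
  | cons x r ih =>
    intro d
    simp only [goFD, freeL, deltaF]
    split_ifs with h1 h2
    · rw [ih, show d - x + deltaF r = d + (deltaF r - x) from by ring]
    · rw [ih, show d + x + deltaF r = d + (deltaF r + x) from by ring]
    · simp only [go]
      rw [ih, ih, show d + x + deltaF r = d + deltaF r + x from by ring,
        show d - x + deltaF r = d + deltaF r - x from by ring]

lemma altCollect_eq (arr : List Int) (n : Int) : ∀ (k : Nat) (i d : Int) (acc : List Int),
    (n - i).toNat = k → i ≤ n →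
    altCollect arr n k i d acc
      = (d + deltaF ((PySem.List.pyRange i n 1).map (fun j => PySem.List.pyGetD arr j 0)),
         acc ++ freeL ((PySem.List.pyRange i n 1).map (fun j => PySem.List.pyGetD arr j 0))) := by
  intro k
  induction k with
  | zero =>
    intro i d acc hk hle
    have h : i = n := by omega
    subst h
    rw [PySem.List.pyRange_one_eq_nil le_rfl]
    simp [altCollect, deltaF, freeL]
  | succ k ih =>
    intro i d acc hk hle
    have hlt : i < n := by omega
    have hne : ¬ i = n := by omega
    rw [altCollect, PySem.List.pyRange_one_cons hlt]
    simp only [List.map_cons, deltaF, freeL, if_neg hne]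
    have ih' := fun d acc => ih (i + 1) d acc (by omega) (by omega)
    split_ifs with h1 h2
    · rw [ih']
      simp only [Prod.mk.injEq]
      exact ⟨by ring, trivial⟩
    · rw [ih']
      simp only [Prod.mk.injEq]
      exact ⟨by ring, trivial⟩
    · rw [ih']
      simp [List.append_assoc]

lemma mem_expandOnce (x a : Int) : ∀ (L t : List Int),
    a ∈ L.foldl (fun (new : PySem.Set Int) d => PySem.Set.add (PySem.Set.add new (d + x)) (d - x)) t
      ↔ a ∈ t ∨ ∃ d ∈ L, a = d + x ∨ a = d - x := by
  intro L
  induction L with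
  | nil => intro t; simp
  | cons y L ih =>
    intro t
    simp only [List.foldl_cons]
    rw [ih]
    simp only [PySem.Set.mem_add, List.mem_cons]
    constructor
    · rintro (((h | h) | h) | ⟨d, hd, h⟩)
      · exact Or.inl h
      · exact Or.inr ⟨y, Or.inl rfl, Or.inl h⟩
      · exact Or.inr ⟨y, Or.inl rfl, Or.inr h⟩
      · exact Or.inr ⟨d, Or.inr hd, h⟩
    · rintro (h | ⟨d, rfl | hd, h⟩)
      · exact Or.inl (Or.inl (Or.inl h))
      · rcases h with h | h
        · exact Or.inl (Or.inl (Or.inr h))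
        · exact Or.inl (Or.inr h)
      · exact Or.inr ⟨d, hd, h⟩

lemma expand_go : ∀ (f : List Int) (S : List Int),
    (0 ∈ f.foldl
        (fun (reach : PySem.Set Int) x =>
          reach.foldl
            (fun (new : PySem.Set Int) d => PySem.Set.add (PySem.Set.add new (d + x)) (d - x))
            PySem.Set.empty) S)
      ↔ ∃ d ∈ S, go f d = true := by
  intro f
  induction f with
  | nil =>
    intro S
    simp only [List.foldl_nil, go, beq_iff_eq]
    constructor
    · intro h; exact ⟨0, h, rfl⟩
    · rintro ⟨d, hd, rfl⟩; exact hd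
  | cons x r ih =>
    intro S
    simp only [List.foldl_cons]
    rw [ih]
    constructor
    · rintro ⟨d', hd', hgo⟩
      rw [mem_expandOnce] at hd'
      rcases hd' with h | ⟨d, hdS, rfl | rfl⟩
      · simp [PySem.Set.empty] at h
      · exact ⟨d, hdS, by simp [go, hgo]⟩
      · exact ⟨d, hdS, by simp [go, hgo]⟩
    · rintro ⟨d, hdS, hgo⟩
      simp only [go, Bool.or_eq_true] at hgo
      rcases hgo with h | h
      · exact ⟨d + x, by rw [mem_expandOnce]; exact Or.inr ⟨d, hdS, Or.inl rfl⟩, h⟩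
      · exact ⟨d - x, by rw [mem_expandOnce]; exact Or.inr ⟨d, hdS, Or.inr rfl⟩, h⟩

lemma ofList_singleton (x : Int) : PySem.Set.ofList [x] = [x] := rfl

-- ===== VERDICT (by name: the statement is the Claim_ definition above) =====
theorem helper_spec : Claim_equal_helper := by
  intro arr n start lsum rsum _hdom hpre
  unfold Spec_helper
  obtain ⟨hle, -⟩ := hpre
  rw [helper_eq_goA arr n (n - start).toNat start lsum rsum rfl hle]
  rw [goA_eq_goFD, goFD_eq_go]
  simp only [helper_alt]
  rw [altCollect_eq arr n (n - start).toNat start (lsum - rsum) [] rfl hle]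
  simp only [List.nil_append]
  rw [Bool.eq_iff_iff]
  have hc : ∀ (S : PySem.Set Int),
      PySem.Set.contains S 0 = true ↔ (0 : Int) ∈ S := by
    intro S; simp [PySem.Set.contains]
  rw [hc, ofList_singleton, expand_go]
  constructor
  · intro h
    exact ⟨_, List.mem_singleton.mpr rfl, h⟩
  · rintro ⟨d, hd, h⟩
    rw [List.mem_singleton] at hd
    subst hd
    exact h
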